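-- pv_equiv track=rewrite | github.com/EgorSavchuk/autoMOZI | task4.py | get_elements_for_group
-- ===== SOURCE A (Python) =====
-- from math import gcd
--
-- def get_z_with_star(z):
--     """
--     :param z: Кольцо Z
--     :return: Группа Z*
--     """
--     z_with_star = []
--     for i in z:
--         if gcd(i, z[len(z) - 1] + 1) == 1:
--             z_with_star.append(i)
--     return z_with_star
--
-- def get_elements_for_group(group_order, orders, z):
--     """
--     :param group_order: Порядок группы
--     :param orders: Словарь { элемент : порядок элемента }
--     :param z: Кольцо Z
--     :return: Все элементы подгруппы порядка group_order
--     """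
--     generate_element = 0
--     result_group = set()
--     for element, order in orders.items():
--         if order == group_order:
--             generate_element = element
--     for i in range(1, len(get_z_with_star(z)) + 1):
--         generate_element_pow = pow(generate_element, i) % len(z)
--         if generate_element_pow in orders:
--             result_group.add(generate_element_pow)
--     return list(result_group)
-- ===== SOURCE B (Python) =====
-- from math import gcd
--
-- def get_elements_for_group(group_order, orders, z):
--     n = len(z)
--     g = next((k for k, v in reversed(list(orders.items())) if v == group_order), 0)
--     m = sum(1 for x in z if gcd(x, z[-1] + 1) == 1)
--     # Orbit of g under x -> x*g % n, capped at m steps, with cycle cut-off: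
--     # the sequence of powers is a functional iteration, so once a power
--     # repeats no new value can ever appear and we can stop early.
--     orbit = []
--     p = 1
--     for _ in range(m):
--         p = p * g % n
--         if p in orbit:
--             break
--         orbit.append(p)
--     return [v for v in orbit if v in orders]
-- ===== Notes on version B (the rewrite author's own statement) =====
-- stated objective: alternative
-- what changed: B builds the generator's orbit by one incremental modular multiplication per step and stops at the first repeated power (a functional iteration can produce no new value after a repeat), then filters the orbit by dict-key membership in a separate second stage, instead of A's m from-scratch pow(g,i) computations with conditional set insertion; the generator is found by first match on the reversed items and the coprime elements are counted rather than materialised.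
import Mathlib
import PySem

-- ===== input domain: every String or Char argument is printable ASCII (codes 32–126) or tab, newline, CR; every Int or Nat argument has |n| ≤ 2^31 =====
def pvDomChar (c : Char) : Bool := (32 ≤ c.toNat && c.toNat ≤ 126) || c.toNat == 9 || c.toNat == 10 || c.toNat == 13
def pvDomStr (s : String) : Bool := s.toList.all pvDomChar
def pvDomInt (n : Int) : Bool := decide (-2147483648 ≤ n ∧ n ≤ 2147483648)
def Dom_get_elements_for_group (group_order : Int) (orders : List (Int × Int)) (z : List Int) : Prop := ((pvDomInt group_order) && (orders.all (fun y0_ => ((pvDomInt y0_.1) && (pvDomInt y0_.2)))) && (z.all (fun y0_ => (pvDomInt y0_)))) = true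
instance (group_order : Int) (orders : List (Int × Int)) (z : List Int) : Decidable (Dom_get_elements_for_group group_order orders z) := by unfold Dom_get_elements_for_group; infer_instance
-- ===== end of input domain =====

-- B computes the generator's orbit by incremental modular multiplication with cycle cut-off
-- (it stops at the first repeated power) and filters that orbit by key membership in a second
-- stage, instead of A's fixed number of from-scratch pow computations with conditional set
-- insertion (objective: alternative). A's returned collection is a Python set (compared as a
-- set); both ports list it in first-insertion order.

-- ===== PORT A =====
-- math.gcd on ints is the nonnegative gcd of absolute values: Int.gcd, exact
def get_z_with_star (z : List Int) : List Int :=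
  z.foldl (fun acc i =>
    if Int.gcd i (PySem.List.pyGetD z ((z.length : Int) - 1) 0 + 1) = 1 then acc ++ [i] else acc) []

def get_elements_for_group (group_order : Int) (orders : List (Int × Int)) (z : List Int) : List Int :=
  -- first loop: keep the last element whose order equals group_order (dict iteration = list order)
  let generate_element := orders.foldl (fun acc p => if p.2 = group_order then p.1 else acc) 0
  -- loop over range(1, len(get_z_with_star(z)) + 1); 'x in orders' is dict-key membership;
  -- pow(g, i) with i ≥ 1, '% len(z)' is Python floor mod (PySem.Int.mod); result_group is a set
  (PySem.List.pyRange 1 (((get_z_with_star z).length : Int) + 1) 1).foldl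
    (fun (result_group : PySem.Set Int) i =>
      if orders.any (fun q => q.1 == PySem.Int.mod (generate_element ^ i.toNat) (z.length : Int))
      then PySem.Set.add result_group (PySem.Int.mod (generate_element ^ i.toNat) (z.length : Int))
      else result_group) []

-- ===== PORT B =====
-- the orbit loop of Source B: 'for _ in range(fuel): p = p*g % n; if p in orbit: break; orbit.append(p)'
def pvOrbit (g n : Int) : Nat → Int → List Int → List Int
  | 0, _, orbit => orbit
  | fuel + 1, p, orbit =>
      let q := PySem.Int.mod (p * g) n
      if orbit.contains q then orbit else pvOrbit g n fuel q (orbit ++ [q])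

def get_elements_for_group_alt (group_order : Int) (orders : List (Int × Int)) (z : List Int) : List Int :=
  let n : Int := (z.length : Int)
  -- g = next((k for k, v in reversed(list(orders.items())) if v == group_order), 0)
  let g := ((orders.reverse.find? (fun p => p.2 == group_order)).map Prod.fst).getD 0
  -- m = sum(1 for x in z if gcd(x, z[-1] + 1) == 1): z[-1] only evaluated on nonempty z
  let m := z.countP (fun x => Int.gcd x (PySem.List.pyGetD z (-1) 0 + 1) = 1)
  -- second stage: [v for v in orbit if v in orders] ('v in orders' = dict-key membership)
  (pvOrbit g n m 1 []).filter (fun v => orders.any (fun q => q.1 == v))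

-- ===== PRECONDITION & SPEC =====
-- no Pre_: both A and B are total (on empty z, m = 0 and neither loop body runs; both return [])

def Spec_get_elements_for_group (group_order : Int) (orders : List (Int × Int)) (z : List Int) (out : List Int) : Prop := out = get_elements_for_group_alt group_order orders z
instance (group_order : Int) (orders : List (Int × Int)) (z : List Int) (out : List Int) : Decidable (Spec_get_elements_for_group group_order orders z out) := by unfold Spec_get_elements_for_group; infer_instance

-- ===== CLAIM (what is proved, stated in full; the proofs are below) =====
def Claim_equal_get_elements_for_group : Prop := ∀ (group_order : Int) (orders : List (Int × Int)) (z : List Int), Dom_get_elements_for_group group_order orders z → Spec_get_elements_for_group group_order orders z (get_elements_for_group group_order orders z)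

-- ===== LEMMAS AND PROOFS =====

-- the last match of A's first loop is the first match of the reversed list
theorem last_match_eq_rev_find (go : Int) (l : List (Int × Int)) (a : Int) :
    l.foldl (fun acc p => if p.2 = go then p.1 else acc) a
      = (((l.reverse.find? (fun p => p.2 == go)).map Prod.fst).getD a) := by
  induction l generalizing a with
  | nil => simp
  | cons x l ih =>
      simp only [List.foldl_cons, ih, List.reverse_cons, List.find?_append]
      cases h : l.reverse.find? (fun p => p.2 == go) with
      | some y => simp
      | none =>
          by_cases hx : x.2 = go
          · simp [List.find?, hx]
          · have hxb : (x.2 == go) = false := by simp [hx]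
            simp [List.find?, hxb, hx]

-- z[-1] and z[len(z)-1] agree on nonempty z
theorem pyGetD_neg_one_eq (z : List Int) (hz : z ≠ []) :
    PySem.List.pyGetD z (-1) 0 = PySem.List.pyGetD z ((z.length : Int) - 1) 0 := by
  have hlen : 0 < z.length := List.length_pos_iff.mpr hz
  have hidx : PySem.List.pyIdx? z.length (-1) = PySem.List.pyIdx? z.length ((z.length : Int) - 1) := by
    simp only [PySem.List.pyIdx?]
    split_ifs <;> first | rfl | (exfalso; omega) | (simp only [Option.some.injEq]; omega)
  simp [PySem.List.pyGetD, PySem.List.pyGet?, hidx]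

-- A's filter loop is a filter; its length is B's countP
theorem length_z_star (z : List Int) (hz : z ≠ []) :
    (get_z_with_star z).length
      = z.countP (fun x => Int.gcd x (PySem.List.pyGetD z (-1) 0 + 1) = 1) := by
  unfold get_z_with_star
  rw [PySem.List.foldl_append_ite_eq_filter
        (fun i => Int.gcd i (PySem.List.pyGetD z ((z.length : Int) - 1) 0 + 1) = 1) z []]
  rw [pyGetD_neg_one_eq z hz]
  simp [List.countP_eq_length_filter]

-- the list of the first m powers g^1 % n, …, g^m % n
def powList (g n : Int) (m : Nat) : List Int :=
  (List.range m).map (fun k => PySem.Int.mod (g ^ (k + 1)) n)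

-- A's main loop is the conditional Set.add fold over powList
theorem A_loop_eq_powList (g n : Int) (cond : Int → Bool) (m : Nat) :
    (PySem.List.pyRange 1 ((m : Int) + 1) 1).foldl
      (fun (rs : List Int) i =>
        if cond (PySem.Int.mod (g ^ i.toNat) n)
        then PySem.Set.add rs (PySem.Int.mod (g ^ i.toNat) n) else rs) []
    = (powList g n m).foldl
        (fun (rs : List Int) v => if cond v then PySem.Set.add rs v else rs) [] := by
  induction m with
  | zero =>
      rw [show ((0 : Nat) : Int) + 1 = 1 by norm_num,
          PySem.List.pyRange_one_eq_nil (le_refl (1 : Int))]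
      rfl
  | succ m ih =>
      have hcast : (((m + 1 : Nat) : Int)) + 1 = ((m : Int) + 1) + 1 := by push_cast; ring
      rw [hcast, PySem.List.pyRange_one_succ_right (by omega : (1 : Int) ≤ (m : Int) + 1)]
      rw [List.foldl_append, ih, List.foldl_cons, List.foldl_nil]
      have : ((m : Int) + 1).toNat = m + 1 := by omega
      rw [this]
      unfold powList
      rw [List.range_succ, List.map_append, List.foldl_append]
      rfl

-- conditional Set.add fold = filter of the unconditional Set.add fold (the predicate is on the value)
theorem condFold_eq_filter_dedup (cond : Int → Bool) (l : List Int) :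
    ∀ s : List Int,
      l.foldl (fun (rs : List Int) v => if cond v then PySem.Set.add rs v else rs) (s.filter cond)
        = (l.foldl PySem.Set.add s).filter cond := by
  induction l with
  | nil => intro s; rfl
  | cons x l ih =>
      intro s
      simp only [List.foldl_cons]
      by_cases hx : x ∈ s
      · have hadd : PySem.Set.add s x = s := by
          simp [PySem.Set.add, hx]
        by_cases hc : cond x = true
        · have hxf : x ∈ s.filter cond := List.mem_filter.mpr ⟨hx, hc⟩
          have : PySem.Set.add (s.filter cond) x = s.filter cond := by
            simp [PySem.Set.add, hxf]
          rw [hc, if_pos rfl, this, hadd]; exact ih s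
        · rw [if_neg (by simp [hc]), hadd]; exact ih s
      · have hadd : PySem.Set.add s x = s ++ [x] := by
          simp [PySem.Set.add, hx]
        have hfil : (s ++ [x]).filter cond = s.filter cond ++ (if cond x then [x] else []) := by
          rw [List.filter_append]; cases hcx : cond x <;> simp [List.filter, hcx]
        by_cases hc : cond x = true
        · have hxf : x ∉ s.filter cond := fun h => hx (List.mem_filter.mp h).1
          have : PySem.Set.add (s.filter cond) x = s.filter cond ++ [x] := by
            simp [PySem.Set.add, hxf]
          rw [hc, if_pos rfl, this, hadd, ← ih (s ++ [x]), hfil, if_pos hc]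
        · rw [if_neg (by simp [hc]), hadd, ← ih (s ++ [x]), hfil, if_neg (by simp [hc])]
          simp

-- a Set.add fold over elements of a closed set is the identity
theorem dedupFold_closed (f : Int → Int) (orbit : List Int)
    (hclosed : ∀ x ∈ orbit, f x ∈ orbit) :
    ∀ (l : List Int) (c : Int), c ∈ orbit →
      (∀ i, (h : i < l.length) → l[i] = f^[i + 1] c) →
      l.foldl PySem.Set.add orbit = orbit := by
  intro l
  induction l with
  | nil => intro c _ _; rfl
  | cons x l ih =>
      intro c hc hseq
      have hx : x = f c := by
        have := hseq 0 (by simp)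
        simpa using this
      have hxo : x ∈ orbit := hx ▸ hclosed c hc
      have hadd : PySem.Set.add orbit x = orbit := by
        simp [PySem.Set.add, hxo]
      rw [List.foldl_cons, hadd]
      refine ih x hxo ?_
      intro i hi
      have := hseq (i + 1) (by simpa using Nat.succ_lt_succ hi)
      simpa [hx, Function.iterate_succ_apply] using this

-- iterating x ↦ x*g % n from the reduced power g^j gives the reduced power g^(j+1+i) (n > 0)
theorem iterate_from_pow (g n : Int) (hn : 0 < n) (j : Nat) :
    ∀ i : Nat, (fun x => PySem.Int.mod (x * g) n)^[i + 1] (PySem.Int.mod (g ^ j) n)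
      = PySem.Int.mod (g ^ (j + 1 + i)) n := by
  intro i
  induction i with
  | zero =>
      simp only [zero_add, Function.iterate_one, PySem.Int.mod_eq_emod_of_pos hn]
      rw [Int.mul_emod, Int.emod_emod_of_dvd _ dvd_rfl, ← Int.mul_emod]
      congr 2
      ring
  | succ i ih =>
      rw [Function.iterate_succ_apply', ih]
      simp only [PySem.Int.mod_eq_emod_of_pos hn]
      rw [Int.mul_emod, Int.emod_emod_of_dvd _ dvd_rfl, ← Int.mul_emod, ← pow_succ]
      congr 2

-- main orbit lemma: pvOrbit from state (p = g^j reduced, orbit = first j powers) equals the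
-- Set.add fold of the remaining fuel powers onto orbit
theorem pvOrbit_run (g n : Int) (hn : 0 < n) :
    ∀ (fuel j : Nat) (p : Int),
      p % n = g ^ j % n →
      (powList g n j).Nodup →
      pvOrbit g n fuel p (powList g n j)
        = ((List.range fuel).map (fun k => PySem.Int.mod (g ^ (j + 1 + k)) n)).foldl
            PySem.Set.add (powList g n j) := by
  intro fuel
  induction fuel with
  | zero => intro j p _ _; rfl
  | succ fuel ih =>
      intro j p hp hnd
      have hq : PySem.Int.mod (p * g) n = PySem.Int.mod (g ^ (j + 1)) n := by
        simp only [PySem.Int.mod_eq_emod_of_pos hn]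
        rw [Int.mul_emod, hp, ← Int.mul_emod, pow_succ]
      show (if (powList g n j).contains (PySem.Int.mod (p * g) n) then powList g n j
            else pvOrbit g n fuel (PySem.Int.mod (p * g) n)
                   (powList g n j ++ [PySem.Int.mod (p * g) n]))
          = _
      rw [hq]
      by_cases hmem : PySem.Int.mod (g ^ (j + 1)) n ∈ powList g n j
      · rw [if_pos (List.contains_iff_mem.mpr hmem)]
        -- the orbit is closed under x ↦ x*g % n, so the remaining fold adds nothing
        have hclosed : ∀ x ∈ powList g n j,
            (fun x => PySem.Int.mod (x * g) n) x ∈ powList g n j := by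
          intro x hx
          obtain ⟨k, hk, rfl⟩ := by
            simpa [powList, List.mem_map, List.mem_range] using hx
          have hstep : PySem.Int.mod (PySem.Int.mod (g ^ (k + 1)) n * g) n
              = PySem.Int.mod (g ^ (k + 2)) n := by
            simp only [PySem.Int.mod_eq_emod_of_pos hn]
            rw [Int.mul_emod, Int.emod_emod_of_dvd _ dvd_rfl, ← Int.mul_emod]
            congr 1
            ring
          by_cases hkj : k + 1 < j
          · simp only [hstep]
            exact List.mem_map.mpr ⟨k + 1, List.mem_range.mpr hkj, rfl⟩
          · have hkj' : k + 1 = j := by omega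
            simp only [hstep, show k + 2 = j + 1 by omega]
            exact hmem
        have hj0 : 0 < j := by
          rcases Nat.eq_zero_or_pos j with h | h
          · subst h; simp [powList] at hmem
          · exact h
        have hcj : PySem.Int.mod (g ^ j) n ∈ powList g n j := by
          refine List.mem_map.mpr ⟨j - 1, List.mem_range.mpr (by omega), ?_⟩
          rw [show j - 1 + 1 = j from by omega]
        refine (dedupFold_closed (fun x => PySem.Int.mod (x * g) n) (powList g n j) hclosed
          ((List.range (fuel + 1)).map (fun k => PySem.Int.mod (g ^ (j + 1 + k)) n))
          (PySem.Int.mod (g ^ j) n) hcj ?_).symm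
        intro i hi
        have hval : ((List.range (fuel + 1)).map
            (fun k => PySem.Int.mod (g ^ (j + 1 + k)) n))[i] = PySem.Int.mod (g ^ (j + 1 + i)) n := by
          simp only [List.getElem_map, List.getElem_range]
        rw [hval]
        exact (iterate_from_pow g n hn j i).symm
      · rw [if_neg (by simpa using hmem)]
        have hext : powList g n j ++ [PySem.Int.mod (g ^ (j + 1)) n] = powList g n (j + 1) := by
          simp [powList, List.range_succ]
        have hnd' : (powList g n (j + 1)).Nodup := by
          rw [← hext]
          refine List.Nodup.append hnd (List.nodup_singleton _) ?_
          intro a ha hb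
          exact hmem ((List.mem_singleton.mp hb) ▸ ha)
        have hp' : PySem.Int.mod (g ^ (j + 1)) n % n = g ^ (j + 1) % n := by
          simp only [PySem.Int.mod_eq_emod_of_pos hn]
          exact Int.emod_emod_of_dvd _ dvd_rfl
        rw [hext, ih (j + 1) _ hp' hnd']
        have hadd : PySem.Set.add (powList g n j) (PySem.Int.mod (g ^ (j + 1)) n)
            = powList g n (j + 1) := by
          rw [← hext]
          simp only [PySem.Set.add]
          split
          · next hcontains => exact absurd (by simpa using hcontains) hmem
          · rfl
        conv_rhs => rw [show (List.range (fuel + 1)) = 0 :: (List.range fuel).map (· + 1) from by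
              rw [List.range_succ_eq_map]]
        simp only [List.map_cons, List.map_map, List.foldl_cons, Nat.add_zero]
        rw [hadd]
        congr 1
        apply List.map_congr_left
        intro a _
        simp only [Function.comp_apply]
        rw [show j + 1 + (a + 1) = j + 1 + 1 + a from by omega]

theorem get_elements_for_group_eq (group_order : Int) (orders : List (Int × Int)) (z : List Int) :
    get_elements_for_group group_order orders z = get_elements_for_group_alt group_order orders z := by
  by_cases hz : z = []
  · subst hz
    unfold get_elements_for_group get_elements_for_group_alt get_z_with_star
    simp [PySem.List.pyRange_one_eq_nil (le_refl (1 : Int)), pvOrbit]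
  have hn : 0 < ((z.length : Int)) := by
    have := List.length_pos_iff.mpr hz
    exact_mod_cast this
  unfold get_elements_for_group get_elements_for_group_alt
  simp only [last_match_eq_rev_find, length_z_star z hz]
  set g := ((orders.reverse.find? (fun p => p.2 == group_order)).map Prod.fst).getD 0 with hg
  set m := z.countP (fun x => Int.gcd x (PySem.List.pyGetD z (-1) 0 + 1) = 1) with hm
  set n := ((z.length : Int)) with hnn
  set cond := fun v => orders.any (fun q => q.1 == v) with hcond
  rw [A_loop_eq_powList g n cond m]
  have h1 : pvOrbit g n m 1 [] = (powList g n m).foldl PySem.Set.add [] := by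
    have := pvOrbit_run g n hn m 0 1 (by simp) (by simp [powList])
    simp only [powList, List.range_zero, List.map_nil] at this
    rw [show ([] : List Int) = powList g n 0 from by simp [powList]] at this ⊢
    rw [this]
    congr 1
    apply List.map_congr_left
    intro a _
    rw [show 0 + 1 + a = a + 1 from by omega]
  rw [h1]
  have := condFold_eq_filter_dedup cond (powList g n m) []
  simpa using this

-- ===== VERDICT (by name: the statement is the Claim_ definition above) =====
theorem get_elements_for_group_spec : Claim_equal_get_elements_for_group := by
  intro group_order orders z _
  unfold Spec_get_elements_for_group
  exact get_elements_for_group_eq group_order orders z
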